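-- pv_equiv track=rewrite | github.com/Hoon-Jung/ACSL-Prep-2023-2024 | rummy/acsl_rummy.py | solverun
-- ===== SOURCE A (Python) =====
-- def solverun(input):
--     input.sort(key=lambda x: [x[1], x[0]])
--     input.insert(0, [0, 0])
--     prev = 0
--     curr = 0
--     temp = []
--     run = []
--     runlen = 0
--     for i in range(1, len(input)):
--         curr = input[i][1]
--         if curr == prev and input[i][0] - 1 == input[i-1][0]:
--             runlen += 1
--             if temp == []:
--                 temp.append(input[i-1])
--                 temp.append(input[i])
--             else:
--                 temp.append(input[i])
--         else:
--             if runlen >= 2: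
--                 run.append(temp.copy())
--             temp = []
--             runlen = 0
--         prev = input[i][1]
--     if runlen >= 2:
--         run.append(temp.copy())
--     return run
-- ===== SOURCE B (Python) =====
-- def solverun(input):
--     # same in-place mutations as the original: sort, then prepend the [0,0] sentinel
--     input.sort(key=lambda x: [x[1], x[0]])
--     input.insert(0, [0, 0])
--     n = len(input)
--     # staged passes: (1) indices where the consecutive-link breaks, (2) pair up
--     # consecutive break positions, (3) slice out the segments of length >= 3
--     breaks = [0] + [i for i in range(1, n)
--                     if not (input[i][1] == input[i-1][1]
--                             and input[i][0] == input[i-1][0] + 1)] + [n]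
--     return [input[s:e] for s, e in zip(breaks, breaks[1:]) if e - s >= 3]
-- ===== Notes on version B (the rewrite author's own statement) =====
-- stated objective: alternative
-- what changed: A's single interleaved scan maintaining prev/temp/runlen accumulators is replaced by staged passes with no run accumulator at all: compute the list of break indices where the consecutive-link fails, pair consecutive break positions with zip, and emit each segment of length >= 3 as a list slice.
import Mathlib
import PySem

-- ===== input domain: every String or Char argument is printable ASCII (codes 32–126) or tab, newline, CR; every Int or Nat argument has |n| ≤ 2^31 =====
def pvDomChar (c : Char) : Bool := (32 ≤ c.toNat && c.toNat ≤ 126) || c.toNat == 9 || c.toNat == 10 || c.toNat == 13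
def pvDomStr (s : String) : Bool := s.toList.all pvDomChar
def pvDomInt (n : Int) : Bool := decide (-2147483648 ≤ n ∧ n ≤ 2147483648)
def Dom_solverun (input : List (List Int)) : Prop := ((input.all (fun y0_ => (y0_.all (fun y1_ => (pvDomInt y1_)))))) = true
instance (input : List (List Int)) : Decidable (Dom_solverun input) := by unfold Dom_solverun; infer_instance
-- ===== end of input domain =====

-- B replaces A's single interleaved scan (prev/temp/runlen accumulators) by staged passes: break indices,
-- zipped consecutive pairs, and list slices of length ≥ 3; equivalence is about the RETURN value —
-- the Python A sorts the argument in place and prepends [0,0]; B performs the same mutations.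

-- ===== PORT A =====
-- state: (prev, temp, run, runlen)
def solverunStepA (l : List (List Int))
    (st : Int × List (List Int) × List (List (List Int)) × Int) (i : Int) :
    Int × List (List Int) × List (List (List Int)) × Int :=
  match st with
  | (prev, temp, run, runlen) =>
    let curr := PySem.List.pyGetD (PySem.List.pyGetD l i []) 1 0
    if curr = prev ∧
        PySem.List.pyGetD (PySem.List.pyGetD l i []) 0 0 - 1
          = PySem.List.pyGetD (PySem.List.pyGetD l (i - 1) []) 0 0 then
      (curr,
       (if temp = [] then [PySem.List.pyGetD l (i - 1) [], PySem.List.pyGetD l i []]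
        else temp ++ [PySem.List.pyGetD l i []]),
       run, runlen + 1)
    else
      (curr, [], run ++ (if 2 ≤ runlen then [temp] else []), 0)

def solverun (input : List (List Int)) : List (List (List Int)) :=
  -- input.sort(key=lambda x: [x[1], x[0]]); input.insert(0, [0, 0])
  let l := PySem.List.insert
    (PySem.List.sorted2 input (fun x => PySem.List.pyGetD x 1 0) (fun x => PySem.List.pyGetD x 0 0))
    0 [0, 0]
  -- prev = 0; temp = []; run = []; runlen = 0; for i in range(1, len(input)): …
  let st := (PySem.List.pyRange 1 (l.length : Int) 1).foldl (solverunStepA l) (0, [], [], 0)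
  -- if runlen >= 2: run.append(temp.copy()); return run
  st.2.2.1 ++ (if 2 ≤ st.2.2.2 then [st.2.1] else [])

-- ===== PORT B =====
def solverun_alt (input : List (List Int)) : List (List (List Int)) :=
  -- input.sort(key=lambda x: [x[1], x[0]]); input.insert(0, [0, 0]); n = len(input)
  let l := PySem.List.insert
    (PySem.List.sorted2 input (fun x => PySem.List.pyGetD x 1 0) (fun x => PySem.List.pyGetD x 0 0))
    0 [0, 0]
  let n : Int := (l.length : Int)
  -- breaks = [0] + [i for i in range(1, n) if not (…link…)] + [n]
  let breaks : List Int := [0] ++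
    (PySem.List.pyRange 1 n 1).filter (fun i =>
      decide (¬ (PySem.List.pyGetD (PySem.List.pyGetD l i []) 1 0
                   = PySem.List.pyGetD (PySem.List.pyGetD l (i - 1) []) 1 0
                 ∧ PySem.List.pyGetD (PySem.List.pyGetD l i []) 0 0
                   = PySem.List.pyGetD (PySem.List.pyGetD l (i - 1) []) 0 0 + 1))) ++ [n]
  -- return [input[s:e] for s, e in zip(breaks, breaks[1:]) if e - s >= 3]
  ((breaks.zip (PySem.List.slice breaks (some 1) none)).filter
      (fun se => decide (3 ≤ se.2 - se.1))).map
    (fun se => PySem.List.slice l (some se.1) (some se.2))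

-- ===== PRECONDITION & SPEC =====
-- Pre_ excludes inputs containing a card of fewer than 2 entries, on which A's sort key x[1] raises IndexError.
def Pre_solverun (input : List (List Int)) : Prop := ∀ x ∈ input, 2 ≤ x.length
instance (input : List (List Int)) : Decidable (Pre_solverun input) := by unfold Pre_solverun; infer_instance
def pvWitness_solverun : List (List Int) := [[3, 1], [5, 1], [4, 1], [7, 2]]
def Spec_solverun (input : List (List Int)) (out : List (List (List Int))) : Prop := out = solverun_alt input
instance (input : List (List Int)) (out : List (List (List Int))) : Decidable (Spec_solverun input out) := by unfold Spec_solverun; infer_instance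

-- ===== CLAIM (what is proved, stated in full; the proofs are below) =====
def Claim_equal_solverun : Prop := ∀ (input : List (List Int)), Dom_solverun input → Pre_solverun input → Spec_solverun input (solverun input)

-- ===== LEMMAS AND PROOFS =====

-- A's loop body with the two adjacent cards passed directly (a = input[i-1], b = input[i])
def stepA' (st : Int × List (List Int) × List (List (List Int)) × Int)
    (a b : List Int) : Int × List (List Int) × List (List (List Int)) × Int :=
  match st with
  | (prev, temp, run, runlen) =>
    let curr := PySem.List.pyGetD b 1 0
    if curr = prev ∧ PySem.List.pyGetD b 0 0 - 1 = PySem.List.pyGetD a 0 0 then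
      (curr, (if temp = [] then [a, b] else temp ++ [b]), run, runlen + 1)
    else
      (curr, [], run ++ (if 2 ≤ runlen then [temp] else []), 0)

-- A's loop as a structural recursion over adjacent pairs
def afold : List (List Int) → List Int →
    (Int × List (List Int) × List (List (List Int)) × Int) →
    (Int × List (List Int) × List (List (List Int)) × Int)
  | [], _, s => s
  | x :: t, p, s => afold t x (stepA' s p x)

def finishA (st : Int × List (List Int) × List (List (List Int)) × Int) :
    List (List (List Int)) :=
  st.2.2.1 ++ (if 2 ≤ st.2.2.2 then [st.2.1] else [])

-- the consecutive link between two adjacent cards, as B's break predicate negates it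
def Rb (p x : List Int) : Bool :=
  decide (PySem.List.pyGetD x 1 0 = PySem.List.pyGetD p 1 0) &&
  decide (PySem.List.pyGetD x 0 0 = PySem.List.pyGetD p 0 0 + 1)

-- B's break-index list, as a structural recursion over adjacent pairs (c = absolute index of x)
def brk : List (List Int) → List Int → Int → List Int
  | [], _, _ => []
  | x :: t, p, c => (if Rb p x then [] else [c]) ++ brk t x (c + 1)

-- B's segment emission over the break list (s = start of the current segment)
def segsB (l : List (List Int)) : Int → List Int → List (List (List Int))
  | _, [] => []
  | s, y :: t =>
    (if 3 ≤ y - s then [PySem.List.slice l (some s) (some y)] else []) ++ segsB l y t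

theorem stepA_eq (l : List (List Int)) (st : Int × List (List Int) × List (List (List Int)) × Int)
    (i : Int) :
    solverunStepA l st i
      = stepA' st (PySem.List.pyGetD l (i - 1) []) (PySem.List.pyGetD l i []) := by
  obtain ⟨p, t, r, n⟩ := st
  simp [solverunStepA, stepA']

theorem range_fold_eq_afold (xs : List (List Int)) :
    ∀ (p : List Int) (s : Int × List (List Int) × List (List (List Int)) × Int),
    (List.range xs.length).foldl
        (fun s k => stepA' s ((p :: xs).getD k []) ((p :: xs).getD (k + 1) [])) s
      = afold xs p s := by
  induction xs with
  | nil => intro p s; simp [afold]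
  | cons x t ih =>
    intro p s
    rw [List.length_cons, List.range_succ_eq_map, List.foldl_cons, List.foldl_map]
    simp only [List.getD_cons_zero, List.getD_cons_succ]
    exact ih x (stepA' s p x)

theorem pyRange_fold_eq_afold (p : List Int) (xs : List (List Int))
    (s : Int × List (List Int) × List (List (List Int)) × Int) :
    (PySem.List.pyRange 1 ((p :: xs).length : Int) 1).foldl (solverunStepA (p :: xs)) s
      = afold xs p s := by
  rw [PySem.List.pyRange_one, List.foldl_map]
  have hlen : (((p :: xs).length : Int) - 1).toNat = xs.length := by
    simp only [List.length_cons]; omega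
  rw [hlen, ← range_fold_eq_afold xs p s]
  apply PySem.List.foldl_congr_mem
  intro acc k _
  rw [stepA_eq]
  have h1 : (1 : Int) + (k : Int) - 1 = ((k : Nat) : Int) := by omega
  have h2 : (1 : Int) + (k : Int) = (((k + 1 : Nat)) : Int) := by omega
  rw [h1, h2, PySem.List.pyGetD_natCast, PySem.List.pyGetD_natCast]

-- B's filtered pyRange over the suffix starting at index i+1 is brk of that suffix
theorem bfilter (l : List (List Int)) (xs : List (List Int)) :
    ∀ (i : Nat), l.drop (i + 1) = xs → i < l.length →
    (PySem.List.pyRange (((i + 1 : Nat)) : Int) ((l.length : Nat) : Int) 1).filter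
      (fun j =>
        decide (¬ (PySem.List.pyGetD (PySem.List.pyGetD l j []) 1 0
                     = PySem.List.pyGetD (PySem.List.pyGetD l (j - 1) []) 1 0
                   ∧ PySem.List.pyGetD (PySem.List.pyGetD l j []) 0 0
                     = PySem.List.pyGetD (PySem.List.pyGetD l (j - 1) []) 0 0 + 1)))
      = brk xs (l.getD i []) (((i + 1 : Nat)) : Int) := by
  induction xs with
  | nil =>
    intro i hdrop hi
    have hlen : l.length = i + 1 := by
      have := congrArg List.length hdrop
      simp at this
      omega
    rw [PySem.List.pyRange_one_eq_nil (by omega)]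
    rfl
  | cons x t ih =>
    intro i hdrop hi
    have hi1 : i + 1 < l.length := by
      have := congrArg List.length hdrop
      simp at this
      omega
    have hx : x = l.getD (i + 1) [] := by
      rw [List.drop_eq_getElem_cons hi1] at hdrop
      have := (List.cons.injEq _ _ _ _).mp hdrop.symm
      rw [this.1]
      simp [List.getD_eq_getElem?_getD, List.getElem?_eq_getElem, hi1]
    have ht : l.drop (i + 2) = t := by
      rw [List.drop_eq_getElem_cons hi1] at hdrop
      exact ((List.cons.injEq _ _ _ _).mp hdrop.symm).2.symm
    rw [PySem.List.pyRange_one_cons (by omega), List.filter_cons]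
    have hpred : (decide (¬ (PySem.List.pyGetD (PySem.List.pyGetD l (((i + 1 : Nat)) : Int) []) 1 0
                     = PySem.List.pyGetD (PySem.List.pyGetD l ((((i + 1 : Nat)) : Int) - 1) []) 1 0
                   ∧ PySem.List.pyGetD (PySem.List.pyGetD l (((i + 1 : Nat)) : Int) []) 0 0
                     = PySem.List.pyGetD (PySem.List.pyGetD l ((((i + 1 : Nat)) : Int) - 1) []) 0 0 + 1)))
        = !(Rb (l.getD i []) x) := by
      have e1 : (((i + 1 : Nat)) : Int) - 1 = ((i : Nat) : Int) := by push_cast; ring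
      simp only [e1, PySem.List.pyGetD_natCast, ← hx]
      simp [Rb, Decidable.not_and_iff_not_or_not]
    rw [hpred]
    have e2 : (((i + 1 : Nat)) : Int) + 1 = (((i + 2 : Nat)) : Int) := by push_cast; ring
    rw [e2, ih (i + 1) ht hi1, ← hx]
    by_cases h : Rb (l.getD i []) x
    · rw [h]
      simp only [brk, h, Bool.not_true, Bool.false_eq_true, if_false, if_true, List.nil_append]
      norm_cast
    · rw [Bool.not_eq_true] at h
      rw [h]
      simp only [brk, h, Bool.not_false, Bool.false_eq_true, if_false, if_true,
        List.singleton_append]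
      norm_cast

-- B's breaks comprehension (the literal predicate from the port) is brk
theorem bside_breaks (p : List Int) (xs : List (List Int)) :
    (PySem.List.pyRange 1 (((p :: xs).length : Int)) 1).filter
      (fun i =>
        decide (¬ (PySem.List.pyGetD (PySem.List.pyGetD (p :: xs) i []) 1 0
                     = PySem.List.pyGetD (PySem.List.pyGetD (p :: xs) (i - 1) []) 1 0
                   ∧ PySem.List.pyGetD (PySem.List.pyGetD (p :: xs) i []) 0 0
                     = PySem.List.pyGetD (PySem.List.pyGetD (p :: xs) (i - 1) []) 0 0 + 1)))
      = brk xs p 1 := by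
  have := bfilter (p :: xs) xs 0 (by simp) (by simp)
  simp only [List.getD_cons_zero, Nat.zero_add, Nat.cast_one] at this
  exact this

-- zip of breaks with its tail, filtered and sliced, is segsB
theorem zip_filter_map_eq_segs (l : List (List Int)) (ys : List Int) :
    ∀ (s : Int),
    (((s :: ys).zip ys).filter (fun se => decide (3 ≤ se.2 - se.1))).map
        (fun se => PySem.List.slice l (some se.1) (some se.2)) = segsB l s ys := by
  induction ys with
  | nil => intro s; simp [segsB]
  | cons y t ih =>
    intro s
    rw [List.zip_cons_cons, List.filter_cons]
    by_cases h : 3 ≤ y - s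
    · simp only [h]
      simp [segsB, h, ih y]
    · simp only [h]
      simp [segsB, h, ih y]

-- two adjacent cards of l, as drop/take
theorem take_two_drop (l : List (List Int)) (i : Nat) (h : i + 1 < l.length) :
    (l.drop i).take 2 = [l.getD i [], l.getD (i + 1) []] := by
  have h0 : i < l.length := by omega
  have hd : l.drop i = l.getD i [] :: l.getD (i + 1) [] :: l.drop (i + 2) := by
    rw [List.drop_eq_getElem_cons h0, List.drop_eq_getElem_cons h,
        List.getD_eq_getElem l [] h0, List.getD_eq_getElem l [] h]
  rw [hd]
  rfl

theorem take_extend (l : List (List Int)) (s i : Nat) (hsi : s ≤ i) (h : i + 1 < l.length) :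
    (l.drop s).take (i + 1 - s) ++ [l.getD (i + 1) []]
      = (l.drop s).take (i + 2 - s) := by
  have h2 : i + 2 - s = (i + 1 - s) + 1 := by omega
  rw [h2, List.take_succ]
  congr 1
  have : (l.drop s)[i + 1 - s]? = l[i + 1]? := by
    rw [List.getElem?_drop]; congr 1; omega
  rw [this, List.getElem?_eq_getElem h]
  simp [List.getD_eq_getElem?_getD, List.getElem?_eq_getElem, h]

-- the nonemptiness of the running chain
theorem take_ne_nil (l : List (List Int)) (s i : Nat) (hs : s < i + 1) (hi : i < l.length) :
    (l.drop s).take (i + 1 - s) ≠ [] := by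
  have : ((l.drop s).take (i + 1 - s)).length = min (i + 1 - s) (l.length - s) := by
    simp
  intro hnil
  rw [hnil] at this
  simp at this
  omega

-- MAIN INVARIANT: A's remaining fold, finished, equals the emitted prefix plus B's remaining segments.
-- i = index of p in l, s = start index of the running chain, run = segments already emitted.
theorem main_invariant (l : List (List Int)) (xs : List (List Int)) :
    ∀ (i s : Nat) (run : List (List (List Int))),
    l.drop (i + 1) = xs → i < l.length → s ≤ i →
    finishA (afold xs (l.getD i [])
        (PySem.List.pyGetD (l.getD i []) 1 0,
         (if s = i then [] else (l.drop s).take (i + 1 - s)),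
         run, ((i : Int) - (s : Int))))
      = run ++ segsB l (s : Int) (brk xs (l.getD i []) (((i + 1 : Nat)) : Int) ++ [(l.length : Int)]) := by
  induction xs with
  | nil =>
    intro i s run hdrop hi hs
    have hlen : l.length = i + 1 := by
      have := congrArg List.length hdrop
      simp at this
      omega
    simp only [afold, finishA, brk, List.nil_append, segsB, List.append_nil]
    by_cases h : 2 ≤ (i : Int) - (s : Int)
    · rw [if_pos h, if_neg (show ¬ s = i by omega),
          if_pos (show (3 : Int) ≤ ((l.length : Nat) : Int) - ((s : Nat) : Int) by omega),
          PySem.List.slice_natCast, hlen]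
    · rw [if_neg h,
          if_neg (show ¬ (3 : Int) ≤ ((l.length : Nat) : Int) - ((s : Nat) : Int) by omega)]
  | cons x t ih =>
    intro i s run hdrop hi hs
    have hi1 : i + 1 < l.length := by
      have := congrArg List.length hdrop
      simp at this
      omega
    have hx : x = l.getD (i + 1) [] := by
      rw [List.drop_eq_getElem_cons hi1] at hdrop
      have := (List.cons.injEq _ _ _ _).mp hdrop.symm
      rw [this.1]
      simp [List.getD_eq_getElem?_getD, List.getElem?_eq_getElem, hi1]
    have ht : l.drop (i + 2) = t := by
      rw [List.drop_eq_getElem_cons hi1] at hdrop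
      exact ((List.cons.injEq _ _ _ _).mp hdrop.symm).2.symm
    have hcast : (((i + 1 : Nat)) : Int) + 1 = (((i + 2 : Nat)) : Int) := by push_cast; ring
    simp only [afold, brk]
    by_cases hR : Rb (l.getD i []) x
    · -- link holds: the chain extends by x
      have hR' : PySem.List.pyGetD x 1 0 = PySem.List.pyGetD (l.getD i []) 1 0 ∧
          PySem.List.pyGetD x 0 0 = PySem.List.pyGetD (l.getD i []) 0 0 + 1 := by
        simpa [Rb] using hR
      have hstep : stepA' (PySem.List.pyGetD (l.getD i []) 1 0,
            (if s = i then [] else (l.drop s).take (i + 1 - s)),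
            run, ((i : Int) - (s : Int))) (l.getD i []) x
          = (PySem.List.pyGetD x 1 0,
             (if s = i + 1 then [] else (l.drop s).take (i + 2 - s)),
             run, (((i + 1 : Nat)) : Int) - (s : Int)) := by
        by_cases hsi : s = i
        · subst hsi
          rw [if_pos rfl]
          simp only [stepA', if_true]
          rw [if_pos ⟨hR'.1, by omega⟩, if_neg (by omega : ¬ s = s + 1), hx,
              show ((s : Int) - (s : Int)) + 1 = (((s + 1 : Nat)) : Int) - (s : Int) from by
                push_cast; ring,
              show s + 1 + 1 - s = 2 from by omega, ← take_two_drop l s hi1]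
        · rw [if_neg hsi]
          simp only [stepA']
          rw [if_pos ⟨hR'.1, by omega⟩, if_neg (take_ne_nil l s i (by omega) (by omega)),
              if_neg (by omega : ¬ s = i + 1), hx, take_extend l s i (by omega) hi1,
              show ((i : Int) - (s : Int)) + 1 = (((i + 1 : Nat)) : Int) - (s : Int) from by
                push_cast; ring]
      have hih := ih (i + 1) s run ht hi1 (by omega)
      rw [← hx, show i + 1 + 1 = i + 2 from by omega] at hih
      rw [hstep, if_pos hR, List.nil_append, hcast]
      exact hih
    · -- link breaks: emit the finished chain (if long enough) and restart at i+1
      have hR' : ¬ (PySem.List.pyGetD x 1 0 = PySem.List.pyGetD (l.getD i []) 1 0 ∧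
          PySem.List.pyGetD x 0 0 = PySem.List.pyGetD (l.getD i []) 0 0 + 1) := by
        simpa [Rb] using hR
      have hemit : (if 2 ≤ (i : Int) - (s : Int)
              then [if s = i then ([] : List (List Int)) else (l.drop s).take (i + 1 - s)]
              else [])
          = (if 3 ≤ (((i + 1 : Nat)) : Int) - ((s : Nat) : Int)
             then [PySem.List.slice l (some ((s : Nat) : Int)) (some (((i + 1 : Nat)) : Int))]
             else []) := by
        by_cases h2 : 2 ≤ (i : Int) - (s : Int)
        · rw [if_pos h2, if_neg (show ¬ s = i by omega),
              if_pos (show (3 : Int) ≤ (((i + 1 : Nat)) : Int) - ((s : Nat) : Int) by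
                push_cast; omega),
              PySem.List.slice_natCast]
        · rw [if_neg h2,
              if_neg (show ¬ (3 : Int) ≤ (((i + 1 : Nat)) : Int) - ((s : Nat) : Int) by
                push_cast; omega)]
      have hih := ih (i + 1) (i + 1)
        (run ++ (if 2 ≤ (i : Int) - (s : Int)
                 then [if s = i then ([] : List (List Int)) else (l.drop s).take (i + 1 - s)]
                 else []))
        ht hi1 (le_refl _)
      rw [← hx, show i + 1 + 1 = i + 2 from by omega,
          if_pos (rfl : (i + 1 : Nat) = i + 1), sub_self] at hih
      simp only [stepA']
      rw [if_neg (by intro hc; exact hR' ⟨hc.1, by omega⟩)]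
      rw [hih, hemit, if_neg hR, hcast]
      rw [List.append_assoc, List.singleton_append, List.cons_append]
      conv_rhs => rw [segsB]

-- ===== VERDICT (by name: the statement is the Claim_ definition above) =====
theorem solverun_spec : Claim_equal_solverun := by
  intro input _ _
  unfold Spec_solverun solverun solverun_alt
  rw [PySem.List.insert_zero]
  set srt := PySem.List.sorted2 input
      (fun x => PySem.List.pyGetD x 1 0) (fun x => PySem.List.pyGetD x 0 0) with hsrt
  dsimp only
  rw [pyRange_fold_eq_afold ([0, 0]) srt (0, [], [], 0)]
  -- B side: breaks → brk, zip/filter/map → segsB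
  rw [show ([(0 : Int)] ++
        (PySem.List.pyRange 1 (((([0, 0] : List Int) :: srt).length : Int)) 1).filter
          (fun i =>
            decide (¬ (PySem.List.pyGetD (PySem.List.pyGetD (([0, 0] : List Int) :: srt) i []) 1 0
                         = PySem.List.pyGetD (PySem.List.pyGetD (([0, 0] : List Int) :: srt) (i - 1) []) 1 0
                       ∧ PySem.List.pyGetD (PySem.List.pyGetD (([0, 0] : List Int) :: srt) i []) 0 0
                         = PySem.List.pyGetD (PySem.List.pyGetD (([0, 0] : List Int) :: srt) (i - 1) []) 0 0 + 1)))
        ++ [((([0, 0] : List Int) :: srt).length : Int)])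
      = (0 : Int) :: (brk srt ([0, 0]) 1 ++ [((([0, 0] : List Int) :: srt).length : Int)]) from by
    rw [bside_breaks ([0, 0]) srt]; rfl]
  rw [PySem.List.slice_from_one, List.tail_cons]
  rw [zip_filter_map_eq_segs (([0, 0] : List Int) :: srt) (brk srt ([0, 0]) 1 ++ [((([0, 0] : List Int) :: srt).length : Int)]) 0]
  -- A side: the main invariant at i = 0, s = 0
  have hmain := main_invariant (([0, 0] : List Int) :: srt) srt 0 0 []
    rfl (by simp) (le_refl 0)
  simp only [List.getD_cons_zero, Nat.zero_add, Nat.cast_one, Nat.cast_zero, sub_self,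
    List.nil_append, if_true,
    show PySem.List.pyGetD ([0, 0] : List Int) 1 0 = (0 : Int) from rfl] at hmain
  simpa [finishA] using hmain
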